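-- pv_equiv track=rewrite | github.com/BartoszTeska/aoc2021 | 3/3.py | getEpsilon
-- ===== SOURCE A (Python) =====
-- from typing import Counter, List, Tuple
--
-- def getEpsilon(arr: List[str], string: bool = False) -> int:
--     wordLength = len(arr[0])
--     epsilon = []
--     for i in range(wordLength):
--         tmp = []
--         for word in arr:
--             tmp.append(word[i])
--         e = Counter(tmp)
--         zeros = e['0']
--         ones = e['1']
--         if(e['1'] == e['0']):
--             epsilon.append('0')
--         else:
--             epsilon.append('1' if ones < zeros else '0')
--     if(string):
--         return ''.join(epsilon)
--     return int(''.join(epsilon), 2)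
-- ===== SOURCE B (Python) =====
-- def getEpsilon(arr, string=False):
--     wordLength = len(arr[0])
--     ones = [0] * wordLength
--     zeros = [0] * wordLength
--     for word in arr:
--         for j in range(wordLength):
--             c = word[j]
--             if c == '1':
--                 ones[j] += 1
--             elif c == '0':
--                 zeros[j] += 1
--     bits = ''.join('1' if ones[j] < zeros[j] else '0' for j in range(wordLength))
--     if string:
--         return bits
--     return int(bits, 2)
-- ===== Notes on version B (the rewrite author's own statement) =====
-- stated objective: alternative
-- what changed: Swaps the loop nesting: one pass over the words maintains per-column ones/zeros counter arrays (no temporary per-column list and no Counter object per column), then a single column loop emits '1' exactly when ones < zeros (which also covers A's explicit tie branch).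
-- outside the precondition, e.g. on getEpsilon(['10', '00'], True): A returns '01', B returns '01'
import Mathlib
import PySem

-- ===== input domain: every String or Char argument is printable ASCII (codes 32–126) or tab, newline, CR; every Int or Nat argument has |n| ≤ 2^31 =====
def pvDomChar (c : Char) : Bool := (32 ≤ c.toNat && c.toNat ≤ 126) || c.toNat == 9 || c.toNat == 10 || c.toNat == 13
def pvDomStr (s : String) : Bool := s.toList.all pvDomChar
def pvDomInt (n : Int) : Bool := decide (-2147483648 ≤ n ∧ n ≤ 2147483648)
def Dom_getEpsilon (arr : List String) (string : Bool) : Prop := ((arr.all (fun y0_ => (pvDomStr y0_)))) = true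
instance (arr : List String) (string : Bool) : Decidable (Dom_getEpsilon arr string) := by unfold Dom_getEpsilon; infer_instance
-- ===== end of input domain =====

-- B swaps the loop nesting (one pass over the words with per-column ones/zeros arrays,
-- instead of a temporary list + Counter per column); return value only.

-- shared helper: int(s, 2) for a string of '0'/'1' digits (both Pythons call int(''.join(...), 2))
def pvBin (cs : List Char) : Int :=
  cs.foldl (fun a c => 2 * a + (if c = '1' then 1 else 0)) 0

-- ===== PORT A =====
-- per column i: collect word[i] over arr, count '0's and '1's (Counter(tmp)['0'] / ['1']),
-- tie → '0', else '1' iff ones < zeros.  word[i] is total here via getD (Pre_ keeps i in range).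
def getEpsilon (arr : List String) (string : Bool) : Int :=
  let wordLength := (arr.headD "").toList.length
  let epsilon : List Char := (List.range wordLength).map (fun i =>
    let tmp : List Char := arr.map (fun word => word.toList.getD i ' ')
    let zeros := tmp.count '0'
    let ones := tmp.count '1'
    if ones = zeros then '0' else if ones < zeros then '1' else '0')
  if string then 0 else pvBin epsilon

-- ===== PORT B =====
-- one word's chars folded into the per-column (ones, zeros) accumulator
def updRow (acc : List (Int × Int)) (cs : List Char) : List (Int × Int) :=
  match acc, cs with
  | [], _ => []
  | a :: as, [] => a :: updRow as []
  | (o, z) :: as, c :: cs =>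
      (if c = '1' then (o + 1, z) else if c = '0' then (o, z + 1) else (o, z)) :: updRow as cs

def getEpsilon_alt (arr : List String) (string : Bool) : Int :=
  let wordLength := (arr.headD "").toList.length
  let counts := arr.foldl (fun acc w => updRow acc w.toList)
      (List.replicate wordLength ((0 : Int), (0 : Int)))
  let bits : List Char := counts.map (fun oz => if oz.1 < oz.2 then '1' else '0')
  if string then 0 else pvBin bits

-- ===== PRECONDITION & SPEC =====
-- Pre_ excludes: empty arr (IndexError), words shorter than arr[0] (IndexError),
-- len(arr[0]) = 0 (int('',2) is a ValueError), and string = true, on which A returns a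
-- str rather than a value of the declared int return type.
def Pre_getEpsilon (arr : List String) (string : Bool) : Prop :=
  string = false ∧ arr ≠ [] ∧ 0 < (arr.headD "").toList.length ∧
    ∀ w ∈ arr, (arr.headD "").toList.length ≤ w.toList.length
instance (arr : List String) (string : Bool) : Decidable (Pre_getEpsilon arr string) := by
  unfold Pre_getEpsilon; infer_instance
def pvWitness_getEpsilon : List String × Bool := (["10", "01", "11"], false)

def Spec_getEpsilon (arr : List String) (string : Bool) (out : Int) : Prop := out = getEpsilon_alt arr string
instance (arr : List String) (string : Bool) (out : Int) : Decidable (Spec_getEpsilon arr string out) := by unfold Spec_getEpsilon; infer_instance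

-- ===== CLAIM (what is proved, stated in full; the proofs are below) =====
def Claim_equal_getEpsilon : Prop := ∀ (arr : List String) (string : Bool), Dom_getEpsilon arr string → Pre_getEpsilon arr string → Spec_getEpsilon arr string (getEpsilon arr string)

-- ===== LEMMAS AND PROOFS =====

theorem updRow_length (acc : List (Int × Int)) (cs : List Char) :
    (updRow acc cs).length = acc.length := by
  induction acc generalizing cs with
  | nil => simp [updRow]
  | cons a as ih =>
    obtain ⟨o, z⟩ := a
    cases cs <;> simp [updRow, ih]

theorem updRow_getElem (acc : List (Int × Int)) (cs : List Char) (j : Nat)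
    (hj : j < acc.length) (hcs : acc.length ≤ cs.length) :
    (updRow acc cs)[j]'(by rw [updRow_length]; exact hj) =
      (if cs[j]'(Nat.lt_of_lt_of_le hj hcs) = '1' then ((acc[j].1 + 1, acc[j].2) : Int × Int)
       else if cs[j]'(Nat.lt_of_lt_of_le hj hcs) = '0' then (acc[j].1, acc[j].2 + 1)
       else acc[j]) := by
  induction acc generalizing cs j with
  | nil => simp at hj
  | cons a as ih =>
    obtain ⟨o, z⟩ := a
    cases cs with
    | nil => simp at hcs
    | cons c cs' =>
      cases j with
      | zero => simp [updRow]
      | succ j' =>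
        simp only [updRow, List.getElem_cons_succ]
        exact ih cs' j' (by simpa using hj) (by simpa using hcs)

theorem foldl_updRow_getElem (ws : List (List Char)) (acc : List (Int × Int)) (j : Nat)
    (hj : j < acc.length) (hws : ∀ w ∈ ws, acc.length ≤ w.length) :
    (ws.foldl (fun a w => updRow a w) acc)[j]'(by
        clear hws
        induction ws generalizing acc with
        | nil => exact hj
        | cons w ws ih => exact ih (updRow acc w) (by rw [updRow_length]; exact hj)) =
      (acc[j].1 + ((ws.map (fun w => w.getD j ' ')).count '1' : Int),
       acc[j].2 + ((ws.map (fun w => w.getD j ' ')).count '0' : Int)) := by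
  induction ws generalizing acc with
  | nil => simp
  | cons w ws ih =>
    have hw : acc.length ≤ w.length := hws w (by simp)
    have hjw : j < w.length := Nat.lt_of_lt_of_le hj hw
    have hlen : j < (updRow acc w).length := by rw [updRow_length]; exact hj
    have hrec := ih (updRow acc w) hlen (by
      intro v hv
      rw [updRow_length]
      exact hws v (by simp [hv]))
    simp only [List.foldl_cons] at *
    rw [hrec, updRow_getElem acc w j hj hw]
    have hgd : w[j]?.getD ' ' = w[j] := by
      simp [List.getElem?_eq_getElem hjw]
    by_cases h1 : w[j] = '1'
    · simp [h1, hgd, List.count_cons]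
      omega
    · by_cases h0 : w[j] = '0'
      · simp [h0, h1, hgd, List.count_cons]
        omega
      · simp [h0, h1, hgd, List.count_cons]

theorem foldl_updRow_length (ws : List (List Char)) (acc : List (Int × Int)) :
    (ws.foldl (fun a w => updRow a w) acc).length = acc.length := by
  induction ws generalizing acc with
  | nil => rfl
  | cons w ws ih => simp only [List.foldl_cons]; rw [ih, updRow_length]

theorem bits_eq_epsilon (arr : List String) (hne : arr ≠ [])
    (hlen : ∀ w ∈ arr, (arr.headD "").toList.length ≤ w.toList.length) :
    ((arr.foldl (fun acc w => updRow acc w.toList)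
        (List.replicate (arr.headD "").toList.length ((0 : Int), (0 : Int)))).map
          (fun oz => if oz.1 < oz.2 then '1' else '0')) =
      (List.range (arr.headD "").toList.length).map (fun i =>
        let tmp : List Char := arr.map (fun word => word.toList.getD i ' ')
        let zeros := tmp.count '0'
        let ones := tmp.count '1'
        if ones = zeros then '0' else if ones < zeros then '1' else '0') := by
  set n := (arr.headD "").toList.length with hn
  have hfold : arr.foldl (fun acc w => updRow acc w.toList)
      (List.replicate n ((0 : Int), (0 : Int))) =
      (arr.map String.toList).foldl (fun a w => updRow a w)
      (List.replicate n ((0 : Int), (0 : Int))) := by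
    rw [List.foldl_map]
  rw [hfold]
  apply List.ext_getElem
  · simp [foldl_updRow_length]
  · intro j h1 h2
    have hj : j < n := by simpa [foldl_updRow_length] using h1
    have hws : ∀ w ∈ arr.map String.toList,
        (List.replicate n ((0 : Int), (0 : Int))).length ≤ w.length := by
      intro w hw
      simp only [List.mem_map] at hw
      obtain ⟨s, hs, rfl⟩ := hw
      simpa using hlen s hs
    have hget := foldl_updRow_getElem (arr.map String.toList)
      (List.replicate n ((0 : Int), (0 : Int))) j (by simpa using hj) hws
    simp only [List.getElem_map, List.getElem_range]
    rw [hget]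
    simp only [List.getElem_replicate, List.map_map]
    have hcomp : ((fun (w : List Char) => w.getD j ' ') ∘ String.toList) =
        (fun word : String => word.toList.getD j ' ') := rfl
    simp only [hcomp]
    set tmp := arr.map (fun word => word.toList.getD j ' ') with htmp
    set ones := tmp.count '1' with hones
    set zeros := tmp.count '0' with hzeros
    simp only [zero_add]
    by_cases heq : ones = zeros
    · simp [heq]
    · by_cases hlt : ones < zeros
      · have : (ones : Int) < (zeros : Int) := by exact_mod_cast hlt
        simp [heq, hlt, this]
      · have : ¬ ((ones : Int) < (zeros : Int)) := by exact_mod_cast hlt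
        simp [heq, hlt, this]

-- ===== VERDICT (by name: the statement is the Claim_ definition above) =====
theorem getEpsilon_spec : Claim_equal_getEpsilon := by
  intro arr string _hdom hpre
  obtain ⟨hs, hne, _hpos, hlen⟩ := hpre
  unfold Spec_getEpsilon getEpsilon getEpsilon_alt
  subst hs
  simp only [Bool.false_eq_true, if_false]
  rw [bits_eq_epsilon arr hne hlen]
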